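-- pv_equiv track=rewrite | github.com/youngduck/AlgorithmStudy | Sorting/2108.py | count
-- ===== SOURCE A (Python) =====
-- def count(num):
--     if len(num) == 1:
--         return num[0]
--     d={}
--     for i in num:
--         if i in d:
--             d[i]+=1
--         else:
--             d[i]=1
--     d=sorted(d.items(),key=(lambda x:x[1]),reverse=True)
--     if d[0][1] == d[1][1] :
--         return d[1][0]
--     else :
--         return d[0][0]
-- ===== SOURCE B (Python) =====
-- def count(num):
--     if len(num) == 1:
--         return num[0]
--     counts = {}
--     for x in num:
--         counts[x] = counts.get(x, 0) + 1
--     best = None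
--     second = None
--     for p in counts.items():
--         if best is None or p[1] > best[1]:
--             second = best
--             best = p
--         elif second is None or p[1] > second[1]:
--             second = p
--     if second[1] == best[1]:
--         return second[0]
--     else:
--         return best[0]
-- ===== Notes on version B (the rewrite author's own statement) =====
-- stated objective: alternative
-- what changed: Instead of sorting all (value,count) pairs by count and reading the first two, B selects the top-2 pairs in one linear pass over the counter with the same strict-greater (insertion-order-stable) tie-break.
-- outside the precondition, e.g. on count([]): A raises IndexError, B raises TypeError; on count([5, 5]): A raises IndexError, B raises TypeError
import Mathlib
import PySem

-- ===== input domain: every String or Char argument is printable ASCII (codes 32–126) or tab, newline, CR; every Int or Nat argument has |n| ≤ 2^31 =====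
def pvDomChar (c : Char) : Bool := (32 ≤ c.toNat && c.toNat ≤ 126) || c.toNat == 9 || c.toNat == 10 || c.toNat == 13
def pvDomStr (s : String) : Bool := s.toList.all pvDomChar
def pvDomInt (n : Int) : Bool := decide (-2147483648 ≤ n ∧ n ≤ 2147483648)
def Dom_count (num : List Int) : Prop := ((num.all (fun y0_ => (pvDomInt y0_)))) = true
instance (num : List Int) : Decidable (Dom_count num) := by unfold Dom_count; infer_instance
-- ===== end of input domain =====

-- B replaces A's sort of the (value, count) pairs by a single linear top-2 selection pass
-- with the same strict-greater, insertion-order-stable tie-break (objective: alternative).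

-- ===== PORT A =====
-- A's counting loop: 'if i in d: d[i]+=1 else: d[i]=1'
def countDictA (num : List Int) : PySem.Dict Int Int :=
  num.foldl
    (fun d i => if d.contains i then d.insert i (d.getD i 0 + 1) else d.insert i 1)
    PySem.Dict.empty

def count (num : List Int) : Int :=
  if num.length = 1 then (PySem.List.pyGet? num 0).getD 0
  else
    let d := countDictA num
    let s := PySem.List.sorted d.items (fun p => p.2) true
    match s with
    | p0 :: p1 :: _ => if p0.2 = p1.2 then p1.1 else p0.1
    | _ => 0   -- Python raises IndexError here (outside Pre_count)

-- ===== PORT B =====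
-- one step of B's top-2 selection loop (best, second as Options)
def top2step (bs : Option (Int × Int) × Option (Int × Int)) (p : Int × Int) :
    Option (Int × Int) × Option (Int × Int) :=
  match bs with
  | (none, _) => (some p, none)
  | (some b, s) =>
    if b.2 < p.2 then (some p, some b)
    else
      match s with
      | none => (some b, some p)
      | some t => if t.2 < p.2 then (some b, some p) else (some b, some t)

-- B's counting loop: 'counts[x] = counts.get(x, 0) + 1'
def countDictB (num : List Int) : PySem.Dict Int Int :=
  num.foldl (fun d x => d.insert x (d.getD x 0 + 1)) PySem.Dict.empty

def count_alt (num : List Int) : Int :=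
  if num.length = 1 then (PySem.List.pyGet? num 0).getD 0
  else
    let d := countDictB num
    match d.items.foldl top2step (none, none) with
    | (some b, some s) => if s.2 = b.2 then s.1 else b.1
    | _ => 0   -- Python raises TypeError here (outside Pre_count)

-- ===== PRECONDITION & SPEC =====
-- Pre_ excludes the inputs on which A raises IndexError: the empty list and
-- lists of length ≥ 2 with fewer than two distinct values (B raises TypeError there).
def Pre_count (num : List Int) : Prop :=
  num.length = 1 ∨ 2 ≤ (PySem.List.dedup num).length
instance (num : List Int) : Decidable (Pre_count num) := by unfold Pre_count; infer_instance

def pvWitness_count : List Int := [1, 2, 2]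

def Spec_count (num : List Int) (out : Int) : Prop := out = count_alt num
instance (num : List Int) (out : Int) : Decidable (Spec_count num out) := by unfold Spec_count; infer_instance

-- ===== CLAIM (what is proved, stated in full; the proofs are below) =====
def Claim_equal_count : Prop := ∀ (num : List Int), Dom_count num → Pre_count num → Spec_count num (count num)

-- ===== LEMMAS AND PROOFS =====

-- the two counting loops build the same dict
lemma count_dict_eq (num : List Int) : countDictA num = countDictB num := by
  unfold countDictA countDictB
  have hf : (fun (d : PySem.Dict Int Int) i => if d.contains i then d.insert i (d.getD i 0 + 1) else d.insert i 1)
      = (fun (d : PySem.Dict Int Int) x => d.insert x (d.getD x 0 + 1)) := by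
    funext d i
    by_cases h : d.contains i
    · simp [h]
    · have h' : d.contains i = false := by simpa using h
      simp [h', PySem.Dict.getD_of_not_contains d (0:Int) h']
  rw [hf]

-- one insertion step preserves the "top-2 of the sorted accumulator" invariant
lemma top2step_inv (acc : List (Int × Int)) (bs : Option (Int × Int) × Option (Int × Int))
    (x : Int × Int)
    (h1 : bs.1 = acc.head?) (h2 : bs.2 = acc.tail.head?) :
    (top2step bs x).1 = (PySem.List.insertBy (fun a b => decide (b.2 < a.2)) x acc).head? ∧
    (top2step bs x).2 = (PySem.List.insertBy (fun a b => decide (b.2 < a.2)) x acc).tail.head? := by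
  obtain ⟨b?, s?⟩ := bs
  match acc with
  | [] =>
    simp at h1 h2; subst h1; subst h2
    simp [top2step, PySem.List.insertBy]
  | [a] =>
    simp at h1 h2; subst h1; subst h2
    by_cases h : a.2 < x.2 <;> simp [top2step, PySem.List.insertBy, h]
  | a :: c :: t =>
    simp at h1 h2; subst h1; subst h2
    by_cases h : a.2 < x.2
    · simp [top2step, PySem.List.insertBy, h]
    · by_cases h' : c.2 < x.2 <;> simp [top2step, PySem.List.insertBy, h, h']

-- the whole fold: B's top-2 pass computes the first two elements of the insertion sort
lemma top2_fold_inv (L : List (Int × Int)) :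
    ∀ (acc : List (Int × Int)) (bs : Option (Int × Int) × Option (Int × Int)),
    bs.1 = acc.head? → bs.2 = acc.tail.head? →
    (L.foldl top2step bs).1
      = (L.foldl (fun acc x => PySem.List.insertBy (fun a b => decide (b.2 < a.2)) x acc) acc).head? ∧
    (L.foldl top2step bs).2
      = (L.foldl (fun acc x => PySem.List.insertBy (fun a b => decide (b.2 < a.2)) x acc) acc).tail.head? := by
  induction L with
  | nil => intro acc bs h1 h2; exact ⟨h1, h2⟩
  | cons x L ih =>
    intro acc bs h1 h2
    have h := top2step_inv acc bs x h1 h2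
    exact ih _ _ h.1 h.2

-- B's pass reads off the first two elements of A's reverse-sorted list
lemma top2_eq_sorted (L : List (Int × Int)) :
    (L.foldl top2step (none, none)).1 = (PySem.List.sorted L (fun p => p.2) true).head? ∧
    (L.foldl top2step (none, none)).2 = (PySem.List.sorted L (fun p => p.2) true).tail.head? := by
  rw [PySem.List.sorted_rev_eq_foldl_insertBy]
  exact top2_fold_inv L [] (none, none) rfl rfl

-- ===== VERDICT (by name: the statement is the Claim_ definition above) =====
theorem count_spec : Claim_equal_count := by
  intro num _ hpre
  unfold Spec_count count count_alt
  by_cases hlen : num.length = 1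
  · simp [hlen]
  · simp only [hlen, if_false]
    rw [count_dict_eq]
    set d := countDictB num with hd
    have hdc : d = PySem.Dict.counter num := PySem.Dict.foldl_insert_getD_add_one_eq_counter num
    have hlenitems : 2 ≤ d.items.length := by
      rw [hdc, PySem.Dict.items_counter]
      rw [List.length_map]
      rcases hpre with h | h
      · exact absurd h hlen
      · simpa [PySem.List.dedup_eq_ofList] using h
    have hlsort : 2 ≤ (PySem.List.sorted d.items (fun p => p.2) true).length := by
      rwa [PySem.List.length_sorted]
    obtain ⟨h1, h2⟩ := top2_eq_sorted d.items
    match hs : PySem.List.sorted d.items (fun p => p.2) true with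
    | [] => rw [hs] at hlsort; simp at hlsort
    | [p0] => rw [hs] at hlsort; simp at hlsort
    | p0 :: p1 :: rest =>
      rw [hs] at h1 h2
      simp only [List.head?_cons, List.tail_cons] at h1 h2
      have ht : d.items.foldl top2step (none, none) = (some p0, some p1) := Prod.ext h1 h2
      rw [ht]
      by_cases he : p0.2 = p1.2
      · simp [he]
      · have he' : ¬ p1.2 = p0.2 := fun h => he h.symm
        simp [he, he']
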